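-- pv_equiv track=rewrite | github.com/govi1989/monitoring | mq_monitoring.py | validate_queue
-- ===== SOURCE A (Python) =====
-- def validate_queue(queues,qcount):
--     result=""
--     sev=None
--     for q in queues:
--         warn=queues[q][0]
--         critical=queues[q][1]
--         if warn <= qcount[q]:
--            if critical <= qcount[q]:
--                 result += "\nQueue %s - Critical. Current Queue - %s" %(q, qcount[q])
--                 sev="red"
--
--            else:
--                 result += "\nQueue %s - Warning. Current Queue - %s" %(q, qcount[q])
--                 if sev is None:
--                     sev="yellow"
--         else:
--             result += "\nQueue %s - Normal. Current Queue - %s" %(q, qcount[q])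
--     return(result, sev)
-- ===== SOURCE B (Python) =====
-- def validate_queue(queues, qcount):
--     # B: compute a status label per queue, build all report lines, then derive
--     # severity once after the loop by priority (any Critical -> red, else any
--     # Warning -> yellow, else None); A instead threads severity through the loop.
--     def label(q):
--         warn = queues[q][0]
--         critical = queues[q][1]
--         if warn <= qcount[q]:
--             return "Critical" if critical <= qcount[q] else "Warning"
--         return "Normal"
--     labels = [label(q) for q in queues]
--     lines = ["\nQueue %s - %s. Current Queue - %s" % (q, label(q), qcount[q]) for q in queues]
--     if "Critical" in labels:
--         sev = "red"
--     elif "Warning" in labels: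
--         sev = "yellow"
--     else:
--         sev = None
--     return ("".join(lines), sev)
-- ===== Notes on version B (the rewrite author's own statement) =====
-- stated objective: simpler
-- what changed: B replaces A's threaded (result, sev) accumulator with one label per queue, a single format template, a post-loop priority rule for severity, and a final join of the collected lines.
import Mathlib
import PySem

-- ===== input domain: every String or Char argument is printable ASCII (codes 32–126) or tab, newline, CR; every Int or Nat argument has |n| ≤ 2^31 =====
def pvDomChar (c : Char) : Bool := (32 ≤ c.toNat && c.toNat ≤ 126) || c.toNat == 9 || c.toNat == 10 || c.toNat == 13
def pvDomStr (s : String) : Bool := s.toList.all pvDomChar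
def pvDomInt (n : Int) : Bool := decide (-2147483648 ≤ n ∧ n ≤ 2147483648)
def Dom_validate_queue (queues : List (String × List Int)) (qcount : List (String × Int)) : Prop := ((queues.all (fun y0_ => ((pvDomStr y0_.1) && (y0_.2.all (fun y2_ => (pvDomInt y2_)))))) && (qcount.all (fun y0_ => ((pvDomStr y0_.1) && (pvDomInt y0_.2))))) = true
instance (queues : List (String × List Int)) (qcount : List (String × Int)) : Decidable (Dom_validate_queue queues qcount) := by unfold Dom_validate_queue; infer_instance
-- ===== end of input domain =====

-- B restructures A's single loop with a threaded (result, sev) state into: a label per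
-- queue, one format template, a post-loop priority rule for sev, and a join of the lines.
-- Equivalence of the RETURN value is proved on Pre_ (the inputs where Python A raises no exception).

-- ===== PORT A =====
def validate_queue (queues : List (String × List Int)) (qcount : List (String × Int)) : String × Option String :=
  let qd := PySem.Dict.ofList queues
  let cd := PySem.Dict.ofList qcount
  qd.keys.foldl (fun (st : String × Option String) q =>
    let warn := PySem.List.pyGetD (qd.getD q []) 0 0
    let critical := PySem.List.pyGetD (qd.getD q []) 1 0
    if warn ≤ cd.getD q 0 then
      if critical ≤ cd.getD q 0 then
        (st.1 ++ ("\nQueue " ++ q ++ " - Critical. Current Queue - " ++ PySem.Int.toStr (cd.getD q 0)),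
         some "red")
      else
        (st.1 ++ ("\nQueue " ++ q ++ " - Warning. Current Queue - " ++ PySem.Int.toStr (cd.getD q 0)),
         match st.2 with | none => some "yellow" | some s => some s)
    else
      (st.1 ++ ("\nQueue " ++ q ++ " - Normal. Current Queue - " ++ PySem.Int.toStr (cd.getD q 0)),
       st.2))
    ("", none)

-- ===== PORT B =====
-- B-side helper: the status label of one queue (Source B's local 'label')
def vqLabel (warn critical n : Int) : String :=
  if warn ≤ n then (if critical ≤ n then "Critical" else "Warning") else "Normal"

-- B-side helper: the formatted report line
def vqLine (q lbl : String) (n : Int) : String :=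
  "\nQueue " ++ q ++ " - " ++ lbl ++ ". Current Queue - " ++ PySem.Int.toStr n

def validate_queue_alt (queues : List (String × List Int)) (qcount : List (String × Int)) : String × Option String :=
  let qd := PySem.Dict.ofList queues
  let cd := PySem.Dict.ofList qcount
  let labels := qd.keys.map (fun q =>
    vqLabel (PySem.List.pyGetD (qd.getD q []) 0 0) (PySem.List.pyGetD (qd.getD q []) 1 0) (cd.getD q 0))
  let lines := qd.keys.map (fun q =>
    vqLine q (vqLabel (PySem.List.pyGetD (qd.getD q []) 0 0) (PySem.List.pyGetD (qd.getD q []) 1 0) (cd.getD q 0)) (cd.getD q 0))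
  let sev := if labels.contains "Critical" then some "red"
             else if labels.contains "Warning" then some "yellow"
             else none
  (PySem.Str.join "" lines, sev)

-- ===== PRECONDITION & SPEC =====
-- Pre_: exactly the inputs where Python A raises no exception — every queue key is present
-- in qcount (else KeyError) and its spec list has at least 2 entries (else IndexError).
def Pre_validate_queue (queues : List (String × List Int)) (qcount : List (String × Int)) : Prop :=
  ∀ q ∈ (PySem.Dict.ofList queues).keys,
    (PySem.Dict.ofList qcount).contains q = true ∧ 2 ≤ ((PySem.Dict.ofList queues).getD q []).length
instance (queues : List (String × List Int)) (qcount : List (String × Int)) : Decidable (Pre_validate_queue queues qcount) := by unfold Pre_validate_queue; infer_instance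

def pvWitness_validate_queue : (List (String × List Int)) × (List (String × Int)) :=
  ([("a", [1, 3]), ("b", [5, 9])], [("a", 2), ("b", 0)])

def Spec_validate_queue (queues : List (String × List Int)) (qcount : List (String × Int)) (out : String × Option String) : Prop := out = validate_queue_alt queues qcount
instance (queues : List (String × List Int)) (qcount : List (String × Int)) (out : String × Option String) : Decidable (Spec_validate_queue queues qcount out) := by unfold Spec_validate_queue; infer_instance

-- ===== CLAIM (what is proved, stated in full; the proofs are below) =====
def Claim_equal_validate_queue : Prop := ∀ (queues : List (String × List Int)) (qcount : List (String × Int)), Dom_validate_queue queues qcount → Pre_validate_queue queues qcount → Spec_validate_queue queues qcount (validate_queue queues qcount)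

-- ===== LEMMAS AND PROOFS =====

-- A's loop body, named for the proofs (definitionally the lambda inside validate_queue)
def vqStepA (qd : PySem.Dict String (List Int)) (cd : PySem.Dict String Int)
    (st : String × Option String) (q : String) : String × Option String :=
  let warn := PySem.List.pyGetD (qd.getD q []) 0 0
  let critical := PySem.List.pyGetD (qd.getD q []) 1 0
  if warn ≤ cd.getD q 0 then
    if critical ≤ cd.getD q 0 then
      (st.1 ++ ("\nQueue " ++ q ++ " - Critical. Current Queue - " ++ PySem.Int.toStr (cd.getD q 0)),
       some "red")
    else
      (st.1 ++ ("\nQueue " ++ q ++ " - Warning. Current Queue - " ++ PySem.Int.toStr (cd.getD q 0)),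
       match st.2 with | none => some "yellow" | some s => some s)
  else
    (st.1 ++ ("\nQueue " ++ q ++ " - Normal. Current Queue - " ++ PySem.Int.toStr (cd.getD q 0)),
     st.2)

-- A's severity update for one queue, expressed through the queue's label
def vqSev (sev : Option String) (l : String) : Option String :=
  if l = "Critical" then some "red"
  else if l = "Warning" then (match sev with | none => some "yellow" | some s => some s)
  else sev

-- the final severity a run of A's updates produces
def vqCombine (sev : Option String) (ls : List String) : Option String :=
  if ls.contains "Critical" then some "red"
  else match sev with
       | some s => some s
       | none => if ls.contains "Warning" then some "yellow" else none

lemma join_cons (l : String) (ls : List String) :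
    PySem.Str.join "" (l :: ls) = l ++ PySem.Str.join "" ls := by
  cases ls with
  | nil => simp [PySem.Str.join]
  | cons m ms => simp [PySem.Str.join, PySem.Chars.join_cons_cons]

lemma vqCombine_step (sev : Option String) (l : String) (ls : List String) :
    vqCombine (vqSev sev l) ls = vqCombine sev (l :: ls) := by
  unfold vqSev vqCombine
  have e1 : ("Critical" = l) = (l = "Critical") := propext ⟨Eq.symm, Eq.symm⟩
  have e2 : ("Warning" = l) = (l = "Warning") := propext ⟨Eq.symm, Eq.symm⟩
  by_cases h1 : l = "Critical" <;> by_cases h2 : l = "Warning" <;>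
    cases sev <;> simp_all

lemma vqStepA_eq (qd : PySem.Dict String (List Int)) (cd : PySem.Dict String Int)
    (st : String × Option String) (q : String) :
    vqStepA qd cd st q =
      (st.1 ++ vqLine q (vqLabel (PySem.List.pyGetD (qd.getD q []) 0 0) (PySem.List.pyGetD (qd.getD q []) 1 0) (cd.getD q 0)) (cd.getD q 0),
       vqSev st.2 (vqLabel (PySem.List.pyGetD (qd.getD q []) 0 0) (PySem.List.pyGetD (qd.getD q []) 1 0) (cd.getD q 0))) := by
  unfold vqStepA vqLine vqLabel vqSev
  by_cases hw : PySem.List.pyGetD (qd.getD q []) 0 0 ≤ cd.getD q 0 <;>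
    by_cases hc : PySem.List.pyGetD (qd.getD q []) 1 0 ≤ cd.getD q 0 <;>
      simp [hw, hc, String.append_assoc]

lemma loopA (qd : PySem.Dict String (List Int)) (cd : PySem.Dict String Int)
    (ks : List String) (res : String) (sev : Option String) :
    ks.foldl (vqStepA qd cd) (res, sev)
    = (res ++ PySem.Str.join "" (ks.map (fun q =>
        vqLine q (vqLabel (PySem.List.pyGetD (qd.getD q []) 0 0) (PySem.List.pyGetD (qd.getD q []) 1 0) (cd.getD q 0)) (cd.getD q 0))),
       vqCombine sev (ks.map (fun q =>
        vqLabel (PySem.List.pyGetD (qd.getD q []) 0 0) (PySem.List.pyGetD (qd.getD q []) 1 0) (cd.getD q 0)))) := by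
  induction ks generalizing res sev with
  | nil => cases sev <;> simp [PySem.Str.join, vqCombine]
  | cons q ks ih =>
    rw [List.foldl_cons, vqStepA_eq, ih, List.map_cons, List.map_cons, join_cons,
        ← vqCombine_step]
    simp [String.append_assoc]

-- ===== VERDICT (by name: the statement is the Claim_ definition above) =====
theorem validate_queue_spec : Claim_equal_validate_queue := by
  intro queues qcount _ _
  unfold Spec_validate_queue
  show List.foldl (vqStepA (PySem.Dict.ofList queues) (PySem.Dict.ofList qcount)) ("", none)
        (PySem.Dict.ofList queues).keys = validate_queue_alt queues qcount
  rw [loopA]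
  unfold validate_queue_alt
  simp [vqCombine]
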